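-- pv_equiv track=rewrite | github.com/williamgki/lwscrape | wilson_lin_chunker.py | _detect_paragraph_structure
-- ===== SOURCE A (Python) =====
-- from typing import Dict, List, Optional, Tuple, Set
--
-- def _detect_paragraph_structure(content: str) -> List[Tuple[str, str, int, int]]:
--     """Simple paragraph-based structure"""
--     paragraphs = [p.strip() for p in content.split('\n\n') if p.strip()]
--
--     # Group paragraphs into reasonable sections
--     sections = []
--     section_size = max(3, len(paragraphs) // 5)  # Aim for ~5 sections
--
--     for i in range(0, len(paragraphs), section_size):
--         section_paras = paragraphs[i:i + section_size]
--         section_name = f"Section {i // section_size + 1}"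
--         section_content = '\n\n'.join(section_paras)
--
--         start_pos = sum(len(p) + 2 for p in paragraphs[:i])
--         end_pos = start_pos + len(section_content)
--
--         sections.append((section_name, section_content, start_pos, end_pos))
--
--     return sections
-- ===== SOURCE B (Python) =====
-- def _detect_paragraph_structure(content: str):
--     """Simple paragraph-based structure (single-pass accumulator version)."""
--     paragraphs = [p.strip() for p in content.split('\n\n') if p.strip()]
--     size = max(3, len(paragraphs) // 5)  # Aim for ~5 sections
--
--     sections = []
--     cur = []          # paragraphs of the section being built
--     pos = 0           # running offset past the consumed paragraphs
--     start = 0         # offset where the current section starts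
--
--     for p in paragraphs:
--         cur.append(p)
--         pos += len(p) + 2
--         if len(cur) == size:
--             body = '\n\n'.join(cur)
--             sections.append((f"Section {len(sections) + 1}", body, start, start + len(body)))
--             cur = []
--             start = pos
--
--     if cur:
--         body = '\n\n'.join(cur)
--         sections.append((f"Section {len(sections) + 1}", body, start, start + len(body)))
--
--     return sections
-- ===== Notes on version B (the rewrite author's own statement) =====
-- stated objective: alternative
-- what changed: Replaced A's range/slice section loop, which re-slices the paragraph list and rescans the whole prefix to recompute each section's start offset, by a single left-to-right pass over the paragraphs keeping an accumulator (current chunk, running offset, section start) and flushing a section whenever the chunk fills.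
import Mathlib
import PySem

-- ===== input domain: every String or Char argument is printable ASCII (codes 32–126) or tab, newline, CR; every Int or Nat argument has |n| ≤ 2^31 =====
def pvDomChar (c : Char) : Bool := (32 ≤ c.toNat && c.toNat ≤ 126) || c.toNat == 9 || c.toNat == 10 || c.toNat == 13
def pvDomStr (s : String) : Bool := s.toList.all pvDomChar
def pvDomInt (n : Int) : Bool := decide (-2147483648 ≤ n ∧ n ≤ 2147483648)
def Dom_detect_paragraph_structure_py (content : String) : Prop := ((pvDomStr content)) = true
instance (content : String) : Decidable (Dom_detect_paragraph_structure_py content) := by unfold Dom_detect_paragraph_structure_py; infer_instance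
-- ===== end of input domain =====

-- B replaces A's range/slice loop (which rescans the paragraph prefix for every section's
-- start offset) by one left-to-right pass keeping an accumulator (current chunk, running
-- offset, section start); same return value, different decomposition.

-- ===== PORT A =====
-- one iteration of A's `for i in range(0, len(paragraphs), section_size)` loop body
def pvAStep (paragraphs : List String) (section_size : Int)
    (sections : List (String × String × Int × Int)) (i : Int) :
    List (String × String × Int × Int) :=
  let section_paras := PySem.List.slice paragraphs (some i) (some (i + section_size))
  let section_name := "Section " ++ PySem.Int.toStr (PySem.Int.floordiv i section_size + 1)
  let section_content := PySem.Str.join "\n\n" section_paras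
  let start_pos := ((PySem.List.slice paragraphs (some 0) (some i)).map
      (fun p => PySem.Str.len p + 2)).sum
  let end_pos := start_pos + PySem.Str.len section_content
  sections ++ [(section_name, section_content, start_pos, end_pos)]

def detect_paragraph_structure_py (content : String) : List (String × String × Int × Int) :=
  -- paragraphs = [p.strip() for p in content.split('\n\n') if p.strip()]  (sep ≠ "", so split? is some)
  let paragraphs := (((PySem.Str.split? content "\n\n").getD []).filter
      (fun p => PySem.Str.strip p != "")).map PySem.Str.strip
  let section_size : Int := max 3 (PySem.Int.floordiv (paragraphs.length : Int) 5)
  (PySem.List.pyRange 0 (paragraphs.length : Int) section_size).foldl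
    (pvAStep paragraphs section_size) []

-- ===== PORT B =====
-- state: (sections, cur, pos, start)
def pvBStep (size : Int)
    (st : List (String × String × Int × Int) × List String × Int × Int) (p : String) :
    List (String × String × Int × Int) × List String × Int × Int :=
  let cur := st.2.1 ++ [p]
  let pos := st.2.2.1 + (PySem.Str.len p + 2)
  if (cur.length : Int) = size then
    let body := PySem.Str.join "\n\n" cur
    (st.1 ++ [("Section " ++ PySem.Int.toStr ((st.1.length : Int) + 1), body,
               st.2.2.2, st.2.2.2 + PySem.Str.len body)], [], pos, pos)
  else
    (st.1, cur, pos, st.2.2.2)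

-- the trailing `if cur:` flush
def pvBFinish (st : List (String × String × Int × Int) × List String × Int × Int) :
    List (String × String × Int × Int) :=
  if st.2.1 ≠ [] then
    let body := PySem.Str.join "\n\n" st.2.1
    st.1 ++ [("Section " ++ PySem.Int.toStr ((st.1.length : Int) + 1), body,
              st.2.2.2, st.2.2.2 + PySem.Str.len body)]
  else st.1

def detect_paragraph_structure_py_alt (content : String) : List (String × String × Int × Int) :=
  let paragraphs := (((PySem.Str.split? content "\n\n").getD []).filter
      (fun p => PySem.Str.strip p != "")).map PySem.Str.strip
  let size : Int := max 3 (PySem.Int.floordiv (paragraphs.length : Int) 5)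
  pvBFinish (paragraphs.foldl (pvBStep size) ([], [], 0, 0))

-- ===== PRECONDITION & SPEC =====
def Spec_detect_paragraph_structure_py (content : String) (out : List (String × String × Int × Int)) : Prop := out = detect_paragraph_structure_py_alt content
instance (content : String) (out : List (String × String × Int × Int)) : Decidable (Spec_detect_paragraph_structure_py content out) := by unfold Spec_detect_paragraph_structure_py; infer_instance

-- ===== CLAIM (what is proved, stated in full; the proofs are below) =====
def Claim_equal_detect_paragraph_structure_py : Prop := ∀ (content : String), Dom_detect_paragraph_structure_py content → Spec_detect_paragraph_structure_py content (detect_paragraph_structure_py content)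

-- ===== LEMMAS AND PROOFS =====

-- total width (len p + 2 per paragraph) of a paragraph list
def pvW (ps : List String) : Int := (ps.map (fun p => PySem.Str.len p + 2)).sum

-- the section tuple made from chunk number k (0-based), its paragraphs, and its start offset
def pvSec (k : Nat) (chunk : List String) (pos : Int) : String × String × Int × Int :=
  ("Section " ++ PySem.Int.toStr ((k : Int) + 1), PySem.Str.join "\n\n" chunk,
   pos, pos + PySem.Str.len (PySem.Str.join "\n\n" chunk))

-- reference result: chunks of size t+1, numbered from k, starting at offset pos
def pvSpec (t : Nat) : List String → Nat → Int → List (String × String × Int × Int)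
  | [], _, _ => []
  | p :: rest, k, pos =>
      pvSec k (p :: rest.take t) pos ::
      pvSpec t (rest.drop t) (k + 1) (pos + pvW (p :: rest.take t))
termination_by ps => ps.length
decreasing_by simp

lemma pvW_nil : pvW [] = 0 := rfl

lemma pvW_append (xs ys : List String) : pvW (xs ++ ys) = pvW xs + pvW ys := by
  simp [pvW]

lemma pvSpec_nil (t : Nat) (k : Nat) (pos : Int) : pvSpec t [] k pos = [] := by
  rw [pvSpec]

lemma pvSpec_cons_of_ne_nil (t : Nat) (ps : List String) (k : Nat) (pos : Int)
    (h : ps ≠ []) :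
    pvSpec t ps k pos =
      pvSec k (ps.take (t + 1)) pos ::
      pvSpec t (ps.drop (t + 1)) (k + 1) (pos + pvW (ps.take (t + 1))) := by
  cases ps with
  | nil => exact absurd rfl h
  | cons p rest => rw [pvSpec]; simp

-- a positive-step range is empty when its bounds collapse …
lemma pvPyRange_nil (a b s : Int) (hs : 0 < s) (hab : b ≤ a) :
    PySem.List.pyRange a b s = [] := by
  rw [PySem.List.pyRange_of_pos _ _ hs, if_neg (by omega)]
  simp

-- … and a cons otherwise
lemma pvPyRange_cons (a b s : Int) (hs : 0 < s) (hab : a < b) :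
    PySem.List.pyRange a b s = a :: PySem.List.pyRange (a + s) b s := by
  have hs0 : s ≠ 0 := by omega
  have hq0 : 0 ≤ (b - a - 1) / s := Int.ediv_nonneg (by omega) (by omega)
  rw [PySem.List.pyRange_of_pos _ _ hs, PySem.List.pyRange_of_pos _ _ hs, if_pos hab]
  rw [show b - a + s - 1 = (b - a - 1) + 1 * s by ring, Int.add_mul_ediv_right _ _ hs0]
  rw [show ((b - a - 1) / s + 1).toNat = ((b - a - 1) / s).toNat + 1 by omega]
  rw [List.range_succ_eq_map, List.map_cons, List.map_map]
  refine List.cons_eq_cons.mpr ⟨by simp, ?_⟩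
  by_cases h2 : a + s < b
  · rw [if_pos h2, show b - (a + s) + s - 1 = b - a - 1 by ring]
    refine List.map_congr_left ?_
    intro k _
    simp [Function.comp]
    ring
  · rw [if_neg h2]
    rw [show (b - a - 1) / s = 0 from Int.ediv_eq_zero_of_lt (by omega) (by omega)]
    simp

-- one unfolding of B's loop body on an explicit state
lemma pvBStep_eq (size : Int) (secs : List (String × String × Int × Int))
    (cur : List String) (pos start : Int) (p : String) :
    pvBStep size (secs, cur, pos, start) p =
      if ((cur ++ [p]).length : Int) = size then
        (secs ++ [("Section " ++ PySem.Int.toStr ((secs.length : Int) + 1),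
                   PySem.Str.join "\n\n" (cur ++ [p]), start,
                   start + PySem.Str.len (PySem.Str.join "\n\n" (cur ++ [p])))],
         [], pos + (PySem.Str.len p + 2), pos + (PySem.Str.len p + 2))
      else (secs, cur ++ [p], pos + (PySem.Str.len p + 2), start) := rfl

-- B never flushes while the chunk stays short
lemma pvB_nofill (t : Nat) :
    ∀ (rest cur : List String) (secs : List (String × String × Int × Int)) (pos start : Int),
      cur.length + rest.length < t + 1 →
      List.foldl (pvBStep ((t + 1 : Nat) : Int)) (secs, cur, pos, start) rest =
        (secs, cur ++ rest, pos + pvW rest, start) := by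
  intro rest
  induction rest with
  | nil => intro cur secs pos start _; simp [pvW_nil]
  | cons p rest ih =>
    intro cur secs pos start h
    rw [List.foldl_cons, pvBStep_eq, if_neg (by simp at h ⊢; omega)]
    rw [ih (cur ++ [p]) secs _ start (by simp at h ⊢; omega)]
    simp [pvW, add_assoc]

-- B flushes exactly when the chunk fills
lemma pvB_fill (t : Nat) :
    ∀ (rest cur : List String) (secs : List (String × String × Int × Int)) (pos start : Int),
      rest ≠ [] → cur.length + rest.length = t + 1 →
      List.foldl (pvBStep ((t + 1 : Nat) : Int)) (secs, cur, pos, start) rest =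
        (secs ++ [pvSec secs.length (cur ++ rest) start], [],
         pos + pvW rest, pos + pvW rest) := by
  intro rest
  induction rest with
  | nil => intro cur secs pos start h _; exact absurd rfl h
  | cons p rest ih =>
    intro cur secs pos start _ h
    cases rest with
    | nil =>
      rw [List.foldl_cons, pvBStep_eq, if_pos (by simp at h ⊢; omega)]
      simp [pvSec, pvW]
    | cons q rest' =>
      rw [List.foldl_cons, pvBStep_eq, if_neg (by simp at h ⊢; omega)]
      rw [ih (cur ++ [p]) secs _ start (by simp) (by simp at h ⊢; omega)]
      simp [pvW, add_assoc]

-- B's whole loop + trailing flush computes pvSpec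
lemma pvB_total (t : Nat) :
    ∀ (n : Nat) (ps : List String) (secs : List (String × String × Int × Int)) (pos : Int),
      ps.length ≤ n →
      pvBFinish (List.foldl (pvBStep ((t + 1 : Nat) : Int)) (secs, [], pos, pos) ps) =
        secs ++ pvSpec t ps secs.length pos := by
  intro n
  induction n with
  | zero =>
    intro ps secs pos h
    have hnil : ps = [] := List.eq_nil_of_length_eq_zero (by omega)
    subst hnil
    simp [pvBFinish, pvSpec_nil]
  | succ n ih =>
    intro ps secs pos h
    by_cases hlen : ps.length ≤ t
    · -- short: no flush in the loop, one trailing flush (or none when empty)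
      cases hps : ps with
      | nil => simp [pvBFinish, pvSpec_nil]
      | cons p rest =>
        subst hps
        rw [pvB_nofill t _ [] secs pos pos (by simpa using hlen)]
        rw [pvSpec_cons_of_ne_nil t _ _ _ (by simp)]
        have h1 : rest.take t = rest := List.take_of_length_le (by simp at hlen; omega)
        have h2 : rest.drop t = [] := List.drop_eq_nil_of_le (by simp at hlen; omega)
        simp [pvBFinish, pvSec, h1, h2, pvSpec_nil]
    · -- at least one full chunk
      rw [not_le] at hlen
      have htake : (ps.take (t + 1)).length = t + 1 := by
        simp [List.length_take]; omega
      rw [← List.take_append_drop (t + 1) ps, List.foldl_append]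
      rw [pvB_fill t (ps.take (t + 1)) [] secs pos pos
            (by intro hnil; rw [hnil] at htake; simp at htake)
            (by simpa using htake)]
      rw [List.nil_append]
      rw [ih (ps.drop (t + 1)) _ _ (by simp; omega)]
      rw [pvSpec_cons_of_ne_nil t (ps.take (t + 1) ++ ps.drop (t + 1)) secs.length pos
            (by intro hnil; rw [List.take_append_drop] at hnil; subst hnil; simp at hlen)]
      simp [List.take_append_drop]

-- A's loop body at index j*(t+1) yields exactly the j-th section
lemma pvAStep_eq (ps : List String) (t j : Nat)
    (acc : List (String × String × Int × Int)) :
    pvAStep ps ((t + 1 : Nat) : Int) acc ((j * (t + 1) : Nat) : Int) =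
      acc ++ [pvSec j ((ps.drop (j * (t + 1))).take (t + 1)) (pvW (ps.take (j * (t + 1))))] := by
  unfold pvAStep pvSec
  rw [PySem.List.slice_natCast_add ps (j * (t + 1)) (t + 1)]
  rw [show ((0 : Int)) = ((0 : Nat) : Int) from rfl, PySem.List.slice_natCast ps 0 (j * (t + 1))]
  rw [PySem.Int.floordiv_natCast]
  rw [Nat.mul_div_cancel j (Nat.succ_pos t)]
  simp [pvW]

-- A's range loop computes pvSpec
lemma pvA_run (ps : List String) (t : Nat) :
    ∀ (n j : Nat) (acc : List (String × String × Int × Int)),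
      ps.length - j * (t + 1) ≤ n →
      (PySem.List.pyRange ((j * (t + 1) : Nat) : Int) (ps.length : Int)
          ((t + 1 : Nat) : Int)).foldl (pvAStep ps ((t + 1 : Nat) : Int)) acc =
        acc ++ pvSpec t (ps.drop (j * (t + 1))) j (pvW (ps.take (j * (t + 1)))) := by
  intro n
  induction n with
  | zero =>
    intro j acc h
    have hge : ps.length ≤ j * (t + 1) := by omega
    rw [pvPyRange_nil _ _ _ (by exact_mod_cast Nat.succ_pos t) (by exact_mod_cast hge)]
    rw [List.drop_eq_nil_of_le hge]
    simp [pvSpec_nil]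
  | succ n ih =>
    intro j acc h
    by_cases hge : ps.length ≤ j * (t + 1)
    · rw [pvPyRange_nil _ _ _ (by exact_mod_cast Nat.succ_pos t) (by exact_mod_cast hge)]
      rw [List.drop_eq_nil_of_le hge]
      simp [pvSpec_nil]
    · rw [not_le] at hge
      rw [pvPyRange_cons _ _ _ (by exact_mod_cast Nat.succ_pos t) (by exact_mod_cast hge)]
      rw [List.foldl_cons, pvAStep_eq]
      rw [show ((j * (t + 1) : Nat) : Int) + ((t + 1 : Nat) : Int)
            = (((j + 1) * (t + 1) : Nat) : Int) by push_cast; ring]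
      have hmul : (j + 1) * (t + 1) = j * (t + 1) + (t + 1) := by ring
      rw [ih (j + 1) _ (by omega)]
      rw [pvSpec_cons_of_ne_nil t (ps.drop (j * (t + 1))) j _
            (by intro hnil; have := congrArg List.length hnil; simp at this; omega)]
      rw [show (ps.drop (j * (t + 1))).drop (t + 1) = ps.drop ((j + 1) * (t + 1)) by
            rw [List.drop_drop]; congr 1; omega]
      rw [show pvW (ps.take (j * (t + 1))) + pvW ((ps.drop (j * (t + 1))).take (t + 1))
            = pvW (ps.take ((j + 1) * (t + 1))) by
            rw [hmul, ← pvW_append, ← List.take_add]]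
      simp

-- A's loop from the start, with empty accumulator
lemma pvA_run0 (ps : List String) (t : Nat) :
    (PySem.List.pyRange 0 (ps.length : Int) ((t + 1 : Nat) : Int)).foldl
        (pvAStep ps ((t + 1 : Nat) : Int)) [] = pvSpec t ps 0 0 := by
  have h := pvA_run ps t ps.length 0 [] (by omega)
  simpa using h

-- the two cores agree for any paragraph list
lemma pvMain (ps : List String) :
    (PySem.List.pyRange 0 (ps.length : Int)
        (max 3 (PySem.Int.floordiv (ps.length : Int) 5))).foldl
      (pvAStep ps (max 3 (PySem.Int.floordiv (ps.length : Int) 5))) [] =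
    pvBFinish (ps.foldl (pvBStep (max 3 (PySem.Int.floordiv (ps.length : Int) 5))) ([], [], 0, 0)) := by
  have hmax : max 3 (PySem.Int.floordiv ((ps.length : Nat) : Int) 5)
      = ((max 3 (ps.length / 5) : Nat) : Int) := by
    rw [show ((5 : Int)) = ((5 : Nat) : Int) from rfl, PySem.Int.floordiv_natCast]
    push_cast [Nat.cast_max]
    rfl
  obtain ⟨t, ht⟩ : ∃ t, max 3 (ps.length / 5) = t + 1 := ⟨max 3 (ps.length / 5) - 1, by omega⟩
  rw [hmax, ht]
  rw [pvB_total t ps.length ps [] 0 le_rfl]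
  rw [pvA_run0 ps t]
  simp

-- ===== VERDICT (by name: the statement is the Claim_ definition above) =====
theorem detect_paragraph_structure_py_spec : Claim_equal_detect_paragraph_structure_py := by
  intro content _
  unfold Spec_detect_paragraph_structure_py detect_paragraph_structure_py detect_paragraph_structure_py_alt
  exact pvMain _
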